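-- pv_equiv track=rewrite | github.com/Mimilv1/lyc-e | bac.py | hauteur_pile
-- ===== SOURCE A (Python) =====
-- def empiler(x,y):
--     x.append(y)
--
-- def depiler(x):
--     a=x[len(x)-1]
--     x.__delitem__(len(x)-1)
--     return a
--
-- def est_vide(x):
--     return not(bool(len(x)))
--
-- def hauteur_pile(P):
--     Q = []
--     n = 0
--     while not(est_vide(P)):
--         n+=1
--         x = depiler(P)
--         empiler(Q,x)
--     while not (est_vide(Q)):
--         x=depiler(Q)
--         empiler(P,x)
--     return n
-- ===== SOURCE B (Python) =====
-- def hauteur_pile(P):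
--     n = 0
--     for _ in P:
--         n += 1
--     return n
-- ===== Notes on version B (the rewrite author's own statement) =====
-- stated objective: simpler
-- what changed: Replaced A's two destructive while-loops through an auxiliary stack Q (pop everything, then push everything back) with a single non-mutating counting pass over P, which leaves P untouched instead of rebuilding it.
import Mathlib
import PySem

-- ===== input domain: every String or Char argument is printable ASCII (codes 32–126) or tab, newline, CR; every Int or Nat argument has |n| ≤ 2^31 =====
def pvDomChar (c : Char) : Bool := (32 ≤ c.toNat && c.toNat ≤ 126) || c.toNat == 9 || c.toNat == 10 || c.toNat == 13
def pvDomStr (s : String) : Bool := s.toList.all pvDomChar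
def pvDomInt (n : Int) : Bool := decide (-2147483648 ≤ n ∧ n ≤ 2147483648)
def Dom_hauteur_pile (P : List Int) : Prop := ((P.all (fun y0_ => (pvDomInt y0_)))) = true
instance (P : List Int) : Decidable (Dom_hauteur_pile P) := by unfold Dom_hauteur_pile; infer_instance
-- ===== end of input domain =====

-- B replaces A's two destructive passes through an auxiliary stack with one non-mutating counting pass (simpler).
-- A temporarily mutates P (pops everything, pushes it all back, net effect nil); B never touches P; the claim is about the return value.

-- ===== PORT A =====
-- first while-loop: pop the top of P onto Q, counting; returns (n, Q, P-emptied)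
def hpLoop1 (P Q : List Int) (n : Int) : Int × List Int :=
  if h : P = [] then (n, Q)
  else hpLoop1 P.dropLast (Q ++ [P.getLast h]) (n + 1)
termination_by P.length
decreasing_by simp [List.length_dropLast]; exact List.length_pos_of_ne_nil h

-- second while-loop: pop Q back onto P (affects only the mutated stack, not the return value)
def hpLoop2 (Q P : List Int) : List Int :=
  if h : Q = [] then P
  else hpLoop2 Q.dropLast (P ++ [Q.getLast h])
termination_by Q.length
decreasing_by simp [List.length_dropLast]; exact List.length_pos_of_ne_nil h

def hauteur_pile (P : List Int) : Int :=
  let r := hpLoop1 P [] 0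
  let _restoredP := hpLoop2 r.2 []
  r.1

-- ===== PORT B =====
def hauteur_pile_alt (P : List Int) : Int :=
  P.foldl (fun n _ => n + 1) 0

-- ===== PRECONDITION & SPEC =====
def Spec_hauteur_pile (P : List Int) (out : Int) : Prop := out = hauteur_pile_alt P
instance (P : List Int) (out : Int) : Decidable (Spec_hauteur_pile P out) := by unfold Spec_hauteur_pile; infer_instance

-- ===== CLAIM (what is proved, stated in full; the proofs are below) =====
def Claim_equal_hauteur_pile : Prop := ∀ (P : List Int), Dom_hauteur_pile P → Spec_hauteur_pile P (hauteur_pile P)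

-- ===== LEMMAS AND PROOFS =====
theorem hpLoop1_fst (P : List Int) : ∀ (Q : List Int) (n : Int), (hpLoop1 P Q n).1 = n + P.length := by
  induction P using List.reverseRecOn with
  | nil => intro Q n; rw [hpLoop1]; simp
  | append_singleton xs x ih =>
      intro Q n
      rw [hpLoop1]
      simp [ih]
      ring

theorem foldl_count (P : List Int) : ∀ (n : Int), P.foldl (fun n _ => n + 1) n = n + P.length := by
  induction P with
  | nil => intro n; simp
  | cons x xs ih => intro n; simp [List.foldl, ih]; ring

-- ===== VERDICT (by name: the statement is the Claim_ definition above) =====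
theorem hauteur_pile_spec : Claim_equal_hauteur_pile := by
  intro P _
  show hauteur_pile P = hauteur_pile_alt P
  simp [hauteur_pile, hauteur_pile_alt, hpLoop1_fst, foldl_count]
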